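-- pv_equiv track=rewrite | github.com/freezefrank/SmartTDS | app.py | detecteer_producttype
-- ===== SOURCE A (Python) =====
-- def detecteer_producttype(tekst: str) -> str | None:
--     t = tekst.lower()
--     if any(w in t for w in ["primer", "grondverf", "grondlaag", "voorstrijk", "hechtprimer"]):
--         return "primer"
--     if any(w in t for w in ["eindlaag", "aflak", "topcoat", "deklaag"]):
--         return "eindlaag"
--     if any(w in t for w in ["beits"]):
--         return "beits"
--     if any(w in t for w in ["lak", "laklaag"]):
--         return "lak"
--     if any(w in t for w in ["vulmiddel", "plamuur", "vuller"]):
--         return "vulmiddel"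
--     return None
-- ===== SOURCE B (Python) =====
-- _TABLE = [
--     ("primer", "primer"), ("grondverf", "primer"), ("grondlaag", "primer"),
--     ("voorstrijk", "primer"), ("hechtprimer", "primer"),
--     ("eindlaag", "eindlaag"), ("aflak", "eindlaag"), ("topcoat", "eindlaag"),
--     ("deklaag", "eindlaag"),
--     ("beits", "beits"),
--     ("lak", "lak"), ("laklaag", "lak"),
--     ("vulmiddel", "vulmiddel"), ("plamuur", "vulmiddel"), ("vuller", "vulmiddel"),
-- ]
--
-- _PRIORITY = ["primer", "eindlaag", "beits", "lak", "vulmiddel"]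
--
-- def detecteer_producttype(tekst: str) -> str | None:
--     t = tekst.lower()
--     # stage 1: collect ALL matching categories (no early exit)
--     hits = [cat for w, cat in _TABLE if w in t]
--     # stage 2: pick the highest-priority category that was hit
--     for cat in _PRIORITY:
--         if cat in hits:
--             return cat
--     return None
-- ===== Notes on version B (the rewrite author's own statement) =====
-- stated objective: alternative
-- what changed: Two staged passes instead of A's short-circuiting branch chain: first collect every category whose keyword occurs in the lowered text, then select the highest-priority category among the hits.
import Mathlib
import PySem

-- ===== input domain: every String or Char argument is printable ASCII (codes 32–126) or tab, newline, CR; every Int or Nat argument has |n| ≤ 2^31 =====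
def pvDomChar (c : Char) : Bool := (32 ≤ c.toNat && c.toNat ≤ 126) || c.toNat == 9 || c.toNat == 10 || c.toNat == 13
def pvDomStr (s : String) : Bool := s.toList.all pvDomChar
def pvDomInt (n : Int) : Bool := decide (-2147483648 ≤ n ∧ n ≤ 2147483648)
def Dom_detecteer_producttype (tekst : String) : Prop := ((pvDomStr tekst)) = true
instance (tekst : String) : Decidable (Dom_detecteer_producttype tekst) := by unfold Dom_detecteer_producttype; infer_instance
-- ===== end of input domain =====

-- B classifies in two staged passes (collect all matching categories, then pick the highest-priority hit) instead of A's short-circuiting branch chain; same cost.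


-- ===== PORT A =====
def detecteer_producttype (tekst : String) : Option String :=
  let t := PySem.Str.lower tekst
  if ["primer", "grondverf", "grondlaag", "voorstrijk", "hechtprimer"].any (fun w => PySem.Str.isIn w t) then some "primer"
  else if ["eindlaag", "aflak", "topcoat", "deklaag"].any (fun w => PySem.Str.isIn w t) then some "eindlaag"
  else if ["beits"].any (fun w => PySem.Str.isIn w t) then some "beits"
  else if ["lak", "laklaag"].any (fun w => PySem.Str.isIn w t) then some "lak"
  else if ["vulmiddel", "plamuur", "vuller"].any (fun w => PySem.Str.isIn w t) then some "vulmiddel"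
  else none

-- ===== PORT B =====
def pvTable : List (String × String) :=
  [("primer", "primer"), ("grondverf", "primer"), ("grondlaag", "primer"),
   ("voorstrijk", "primer"), ("hechtprimer", "primer"),
   ("eindlaag", "eindlaag"), ("aflak", "eindlaag"), ("topcoat", "eindlaag"),
   ("deklaag", "eindlaag"),
   ("beits", "beits"),
   ("lak", "lak"), ("laklaag", "lak"),
   ("vulmiddel", "vulmiddel"), ("plamuur", "vulmiddel"), ("vuller", "vulmiddel")]

def pvPriority : List String := ["primer", "eindlaag", "beits", "lak", "vulmiddel"]

-- stage 2: the for-loop over the priority list with early return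
def pvFirstHit : List String → List String → Option String
  | [], _ => none
  | c :: rest, hits => if hits.contains c then some c else pvFirstHit rest hits

def detecteer_producttype_alt (tekst : String) : Option String :=
  let t := PySem.Str.lower tekst
  -- stage 1: collect ALL matching categories (the list comprehension)
  let hits := (pvTable.filter (fun p => PySem.Str.isIn p.1 t)).map Prod.snd
  pvFirstHit pvPriority hits

-- ===== PRECONDITION & SPEC =====
def Spec_detecteer_producttype (tekst : String) (out : Option String) : Prop := out = detecteer_producttype_alt tekst
instance (tekst : String) (out : Option String) : Decidable (Spec_detecteer_producttype tekst out) := by unfold Spec_detecteer_producttype; infer_instance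

-- ===== CLAIM (what is proved, stated in full; the proofs are below) =====
def Claim_equal_detecteer_producttype : Prop := ∀ (tekst : String), Dom_detecteer_producttype tekst → Spec_detecteer_producttype tekst (detecteer_producttype tekst)

-- ===== LEMMAS AND PROOFS =====
-- ===== VERDICT (by name: the statement is the Claim_ definition above) =====
theorem detecteer_producttype_spec : Claim_equal_detecteer_producttype := by
  intro tekst _
  unfold Spec_detecteer_producttype detecteer_producttype detecteer_producttype_alt
  set t := PySem.Str.lower tekst with ht
  simp only [pvFirstHit, pvPriority, pvTable, List.any_cons,
    List.any_nil]
  by_cases h1 : PySem.Str.isIn "primer" t = true <;>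
  by_cases h2 : PySem.Str.isIn "grondverf" t = true <;>
  by_cases h3 : PySem.Str.isIn "grondlaag" t = true <;>
  by_cases h4 : PySem.Str.isIn "voorstrijk" t = true <;>
  by_cases h5 : PySem.Str.isIn "hechtprimer" t = true <;>
  simp_all
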